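-- pv_equiv track=rewrite | github.com/BojanUSI/Python-Algorithms | Exam/ex3.py | count_vertical
-- ===== SOURCE A (Python) =====
-- def count_vertical(A):
--     c = 0
--     for i in range(len(A)-1):
--         if i % 2 == 0:
--             for j in range(i+1, len(A)):
--                 if j % 2 == 0:
--                     if A[i] == A[j]:
--                         c += 1
--
--     return c
-- ===== SOURCE B (Python) =====
-- def count_vertical(A):
--     seen = {}
--     c = 0
--     for i, v in enumerate(A):
--         if i % 2 == 0:
--             k = seen.get(v, 0)
--             c += k
--             seen[v] = k + 1
--     return c
-- ===== Notes on version B (the rewrite author's own statement) =====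
-- stated objective: faster
-- what changed: Replaced the quadratic double index scan by a single pass over enumerate(A) that keeps a hash map of how often each even-index value was seen so far and adds that count per element.
import Mathlib
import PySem

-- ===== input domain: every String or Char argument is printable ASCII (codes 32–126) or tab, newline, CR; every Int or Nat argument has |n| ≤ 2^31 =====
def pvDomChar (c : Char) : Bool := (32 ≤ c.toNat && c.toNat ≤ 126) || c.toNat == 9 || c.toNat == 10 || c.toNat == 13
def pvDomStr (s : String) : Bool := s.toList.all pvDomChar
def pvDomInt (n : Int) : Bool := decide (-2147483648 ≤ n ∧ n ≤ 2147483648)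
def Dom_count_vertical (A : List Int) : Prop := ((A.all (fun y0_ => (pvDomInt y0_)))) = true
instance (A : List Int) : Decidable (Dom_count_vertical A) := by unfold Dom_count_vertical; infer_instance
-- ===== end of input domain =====

-- B replaces A's quadratic double index scan by one pass with a hash map counting
-- previously seen even-index values.

-- ===== PORT A =====
def count_vertical (A : List Int) : Int :=
  (PySem.List.pyRange 0 ((A.length : Int) - 1) 1).foldl
    (fun c i =>
      if PySem.Int.mod i 2 == 0 then
        (PySem.List.pyRange (i + 1) (A.length : Int) 1).foldl
          (fun c j =>
            if PySem.Int.mod j 2 == 0 then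
              if PySem.List.pyGetD A i 0 == PySem.List.pyGetD A j 0 then c + 1 else c
            else c) c
      else c)
    0

-- ===== PORT B =====
def count_vertical_alt (A : List Int) : Int :=
  ((PySem.List.enumerate A 0).foldl
    (fun (s : PySem.Dict Int Int × Int) p =>
      if PySem.Int.mod p.1 2 == 0 then
        (s.1.insert p.2 (s.1.getD p.2 0 + 1), s.2 + s.1.getD p.2 0)
      else s)
    (PySem.Dict.empty, 0)).2

-- ===== PRECONDITION & SPEC =====
def Spec_count_vertical (A : List Int) (out : Int) : Prop := out = count_vertical_alt A
instance (A : List Int) (out : Int) : Decidable (Spec_count_vertical A out) := by unfold Spec_count_vertical; infer_instance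

-- ===== CLAIM (what is proved, stated in full; the proofs are below) =====
def Claim_equal_count_vertical : Prop := ∀ (A : List Int), Dom_count_vertical A → Spec_count_vertical A (count_vertical A)

-- ===== LEMMAS AND PROOFS =====

-- the values of A at even indices, in order
def pvEvens : List Int → List Int
  | [] => []
  | [x] => [x]
  | x :: _ :: t => x :: pvEvens t

-- number of equal-value pairs: each element paired with the later equal elements
def pvPairH : List Int → Int
  | [] => 0
  | v :: t => (t.count v : Int) + pvPairH t

-- the contribution of outer index i of A's loop
def pvG (A : List Int) (i : Int) : Int :=
  if PySem.Int.mod i 2 == 0 then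
    ((PySem.List.pyRange (i + 1) (A.length : Int) 1).countP
      (fun j => PySem.Int.mod j 2 == 0 && (PySem.List.pyGetD A i 0 == PySem.List.pyGetD A j 0)) : Int)
  else 0

lemma pv_mod_shift (i : Int) : PySem.Int.mod (i + 2) 2 = PySem.Int.mod i 2 := by
  rw [PySem.Int.mod_eq_emod_of_pos (by norm_num), PySem.Int.mod_eq_emod_of_pos (by norm_num)]
  omega

lemma pv_getD_shift (x y : Int) (t : List Int) (j : Int) (hj : 0 ≤ j) :
    PySem.List.pyGetD (x :: y :: t) (j + 2) 0 = PySem.List.pyGetD t j 0 := by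
  obtain ⟨m, rfl⟩ := Int.eq_ofNat_of_zero_le hj
  have h2 : ((m : Int) + 2) = ((m + 2 : Nat) : Int) := by push_cast; ring
  rw [h2, PySem.List.pyGetD_natCast, PySem.List.pyGetD_natCast]
  simp [List.getD]

lemma pv_shift_map (f g : Int → Int) (a b : Int)
    (h : ∀ i, a ≤ i → i < b → f (i + 2) = g i) :
    ((PySem.List.pyRange (a + 2) (b + 2) 1).map f) = ((PySem.List.pyRange a b 1).map g) := by
  rw [PySem.List.pyRange_one, PySem.List.pyRange_one]
  have he : (b + 2 - (a + 2)).toNat = (b - a).toNat := by omega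
  rw [he, List.map_map, List.map_map]
  apply List.map_congr_left
  intro k hk
  rw [List.mem_range] at hk
  have hk' : (k : Int) < b - a := by omega
  simp only [Function.comp]
  have : a + 2 + (k : Int) = (a + k) + 2 := by ring
  rw [this, h (a + k) (by omega) (by omega)]

lemma pv_shift_countP (p q : Int → Bool) (a b : Int)
    (h : ∀ i, a ≤ i → i < b → p (i + 2) = q i) :
    (PySem.List.pyRange (a + 2) (b + 2) 1).countP p = (PySem.List.pyRange a b 1).countP q := by
  rw [PySem.List.pyRange_one, PySem.List.pyRange_one]
  have he : (b + 2 - (a + 2)).toNat = (b - a).toNat := by omega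
  rw [he, List.countP_map, List.countP_map]
  apply List.countP_congr
  intro k hk
  rw [List.mem_range] at hk
  have hk' : (k : Int) < b - a := by omega
  simp only [Function.comp]
  have : a + 2 + (k : Int) = (a + k) + 2 := by ring
  rw [this, h (a + k) (by omega) (by omega)]

lemma pv_inner (A : List Int) (x c : Int) (l : List Int) :
    l.foldl (fun c j => if PySem.Int.mod j 2 == 0 then
        if x == PySem.List.pyGetD A j 0 then c + 1 else c else c) c
    = c + (l.countP (fun j => PySem.Int.mod j 2 == 0 && (x == PySem.List.pyGetD A j 0)) : Int) := by
  rw [← PySem.List.foldl_if_add_one (fun j => PySem.Int.mod j 2 == 0 && (x == PySem.List.pyGetD A j 0)) l c]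
  apply PySem.List.foldl_congr_mem
  intro acc j _
  by_cases h1 : PySem.Int.mod j 2 == 0 <;> by_cases h2 : x == PySem.List.pyGetD A j 0 <;>
    simp [h2]

lemma pv_A_sum (A : List Int) :
    count_vertical A = ((PySem.List.pyRange 0 ((A.length : Int) - 1) 1).map (pvG A)).sum := by
  unfold count_vertical
  rw [show ((PySem.List.pyRange 0 ((A.length : Int) - 1) 1).map (pvG A)).sum
      = 0 + ((PySem.List.pyRange 0 ((A.length : Int) - 1) 1).map (pvG A)).sum by ring]
  rw [← PySem.List.foldl_add (PySem.List.pyRange 0 ((A.length : Int) - 1) 1) (pvG A) 0]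
  apply PySem.List.foldl_congr_mem
  intro acc i _
  by_cases h1 : PySem.Int.mod i 2 == 0
  · rw [if_pos h1, pv_inner, pvG, if_pos h1]
  · rw [if_neg h1, pvG, if_neg h1]; ring

-- A's inner count for outer index 0 counts the head value among even indices ≥ 2
lemma pv_cnt0 (v : Int) : ∀ (t : List Int) (x y : Int),
    (PySem.List.pyRange 1 ((t.length : Int) + 2) 1).countP
      (fun j => PySem.Int.mod j 2 == 0 && (v == PySem.List.pyGetD (x :: y :: t) j 0))
    = (pvEvens t).count v := by
  intro t
  induction t using pvEvens.induct with
  | case1 =>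
    intro x y
    rw [show (([] : List Int).length : Int) + 2 = 2 by norm_num]
    rw [show PySem.List.pyRange 1 2 1 = [1] from by decide]
    simp [pvEvens]
  | case2 z =>
    intro x y
    rw [show (([z] : List Int).length : Int) + 2 = 3 by norm_num]
    rw [show PySem.List.pyRange 1 3 1 = [1, 2] from by decide]
    have hg : PySem.List.pyGetD [x, y, z] 2 0 = z := rfl
    by_cases h : v = z <;>
      simp [pvEvens, hg, h, List.count_cons] <;> omega
  | case3 z w t' ih =>
    intro x y
    have hlen : ((z :: w :: t').length : Int) + 2 = ((t'.length : Int) + 2) + 2 := by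
      simp only [List.length_cons]; push_cast; ring
    rw [hlen]
    rw [PySem.List.pyRange_one_append 1 3 (((t'.length : Int) + 2) + 2) (by omega)
      (by omega)]
    rw [List.countP_append]
    rw [show PySem.List.pyRange 1 3 1 = [1, 2] from by decide]
    rw [show (3 : Int) = 1 + 2 from by norm_num]
    rw [pv_shift_countP _ (fun j => PySem.Int.mod j 2 == 0 &&
        (v == PySem.List.pyGetD (z :: w :: t') j 0)) 1 ((t'.length : Int) + 2)
      (by
        intro i h1 h2
        rw [pv_mod_shift, pv_getD_shift x y _ i (by omega)])]
    rw [ih z w]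
    have hg : PySem.List.pyGetD (x :: y :: z :: w :: t') 2 0 = z := by
      rw [PySem.List.pyGetD_ofNat' _ 2 0]; simp [List.getD]
    by_cases h : v = z <;>
      simp [pvEvens, hg, h, List.count_cons] <;> omega

lemma pv_A_eq (A : List Int) :
    ((PySem.List.pyRange 0 ((A.length : Int) - 1) 1).map (pvG A)).sum = pvPairH (pvEvens A) := by
  induction A using pvEvens.induct with
  | case1 =>
    rw [PySem.List.pyRange_one_eq_nil (by simp)]
    simp [pvEvens, pvPairH]
  | case2 x =>
    rw [PySem.List.pyRange_one_eq_nil (by simp)]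
    simp [pvEvens, pvPairH]
  | case3 x y t ih =>
    have hlA : ((x :: y :: t).length : Int) = (t.length : Int) + 2 := by
      simp only [List.length_cons]; push_cast; ring
    have hb : ((x :: y :: t).length : Int) - 1 = (t.length : Int) + 1 := by omega
    rw [hb, PySem.List.pyRange_one_cons (by omega)]
    simp only [List.map_cons, List.sum_cons]
    have hg0 : pvG (x :: y :: t) 0 = ((pvEvens t).count x : Int) := by
      unfold pvG
      rw [if_pos (by decide)]
      rw [show (0 : Int) + 1 = 1 by norm_num, hlA]
      simp only [PySem.List.pyGetD_zero_cons]
      rw [pv_cnt0 x t x y]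
    have hg1 : pvG (x :: y :: t) 1 = 0 := by
      unfold pvG
      rw [if_neg (by decide)]
    cases t with
    | nil =>
      rw [show ((([] : List Int)).length : Int) + 1 = 1 by norm_num,
        PySem.List.pyRange_one_eq_nil (by norm_num)]
      simp [pvEvens, pvPairH, hg0]
    | cons z t'' =>
      rw [show (0 : Int) + 1 = 1 by norm_num,
        PySem.List.pyRange_one_cons (show (1 : Int) < ((z :: t'').length : Int) + 1 by
          simp only [List.length_cons]; push_cast; omega)]
      simp only [List.map_cons, List.sum_cons]
      rw [show (1 : Int) + 1 = 2 from by norm_num]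
      have hsh : ((PySem.List.pyRange 2 (((z :: t'').length : Int) + 1) 1).map (pvG (x :: y :: z :: t'')))
          = ((PySem.List.pyRange 0 (((z :: t'').length : Int) - 1) 1).map (pvG (z :: t''))) := by
        rw [show (2 : Int) = 0 + 2 by norm_num,
          show ((z :: t'').length : Int) + 1 = (((z :: t'').length : Int) - 1) + 2 by ring]
        apply pv_shift_map
        intro i h0 hib
        unfold pvG
        rw [pv_mod_shift]
        by_cases hm : (PySem.Int.mod i 2 == 0) = true
        · rw [if_pos hm, if_pos hm]
          rw [pv_getD_shift x y (z :: t'') i h0]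
          congr 1
          rw [show i + 2 + 1 = (i + 1) + 2 by ring, hlA]
          apply pv_shift_countP
          intro j hj1 hj2
          rw [pv_mod_shift, pv_getD_shift x y (z :: t'') j (by omega)]
        · rw [if_neg hm, if_neg hm]
      rw [hg1, hsh, ih, hg0]
      simp only [pvEvens, pvPairH]
      ring

lemma pv_foldB (A : List Int) : ∀ (s : Int) (d : PySem.Dict Int Int) (c : Int),
    PySem.Int.mod s 2 = 0 →
    (PySem.List.enumerate A s).foldl
      (fun (st : PySem.Dict Int Int × Int) p =>
        if PySem.Int.mod p.1 2 == 0 then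
          (st.1.insert p.2 (st.1.getD p.2 0 + 1), st.2 + st.1.getD p.2 0)
        else st)
      (d, c)
    = (pvEvens A).foldl
        (fun st v => (st.1.insert v (st.1.getD v 0 + 1), st.2 + st.1.getD v 0)) (d, c) := by
  induction A using pvEvens.induct with
  | case1 => intro s d c _; simp [PySem.List.enumerate_nil, pvEvens]
  | case2 x =>
    intro s d c hs
    have hb : (PySem.Int.mod s 2 == 0) = true := by rw [hs]; rfl
    simp only [PySem.List.enumerate_cons, PySem.List.enumerate_nil, List.foldl_cons,
      List.foldl_nil, pvEvens, hb, if_true]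
  | case3 x y t ih =>
    intro s d c hs
    have hb : (PySem.Int.mod s 2 == 0) = true := by rw [hs]; rfl
    have h1 : PySem.Int.mod (s + 1) 2 = 1 := by
      rw [PySem.Int.mod_eq_emod_of_pos (by norm_num)] at hs ⊢
      omega
    have h1b : (PySem.Int.mod (s + 1) 2 == 0) = false := by rw [h1]; decide
    have h2 : PySem.Int.mod (s + 1 + 1) 2 = 0 := by
      rw [PySem.Int.mod_eq_emod_of_pos (by norm_num)] at hs ⊢
      omega
    simp only [PySem.List.enumerate_cons, List.foldl_cons, pvEvens, hb, h1b,
      if_true, Bool.false_eq_true, if_false]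
    exact ih (s + 1 + 1) _ _ h2

lemma pv_G (E : List Int) : ∀ (d : PySem.Dict Int Int) (c : Int),
    ((E.foldl (fun st v => (st.1.insert v (st.1.getD v 0 + 1), st.2 + st.1.getD v 0)) (d, c)).2)
    = c + (E.map (fun v => d.getD v 0)).sum + pvPairH E := by
  induction E with
  | nil => intro d c; simp [pvPairH]
  | cons v t ih =>
    intro d c
    simp only [List.foldl_cons, List.map_cons, List.sum_cons, pvPairH]
    rw [ih]
    have hmap : (t.map (fun w => (d.insert v (d.getD v 0 + 1)).getD w 0))
        = t.map (fun w => d.getD w 0 + (if (fun w => w == v) w then (1 : Int) else 0)) := by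
      apply List.map_congr_left
      intro w _
      rw [PySem.Dict.getD_insert]
      by_cases h : w = v
      · subst h; simp
      · simp [h]
    rw [hmap]
    rw [PySem.List.sum_map_add_int t (fun w => d.getD w 0) _]
    rw [PySem.List.sum_map_ite_one_zero (fun w => w == v) t]
    have : t.countP (fun w => w == v) = t.count v := rfl
    rw [this]
    ring

lemma pv_B_eq (A : List Int) : count_vertical_alt A = pvPairH (pvEvens A) := by
  unfold count_vertical_alt
  rw [pv_foldB A 0 PySem.Dict.empty 0 (by decide), pv_G]
  simp [PySem.Dict.getD_empty]

-- ===== VERDICT (by name: the statement is the Claim_ definition above) =====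
theorem count_vertical_spec : Claim_equal_count_vertical := by
  intro A _
  unfold Spec_count_vertical
  rw [pv_A_sum, pv_A_eq, pv_B_eq]
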